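-- pv_equiv track=rewrite | github.com/HuyaneMatsu/scarletio | scarletio/web_common/url/url_path.py | normalize_path_parts
-- ===== SOURCE A (Python) =====
-- def normalize_path_parts(parts):
--     """
--     Normalises the given parts.
--
--     Parameters
--     ----------
--     parts : `list<str>`
--         The parts to normalize.
--
--     Returns
--     -------
--     parts : `None | list<str>`
--         The normalized parts.
--     """
--     if parts is None:
--         return None
--
--     parts_length = len(parts)
--     deleted_count = 0
--
--     # Remove single dot parts. If the last is dot set it as empty string instead.
--     index = 0
--     while index < parts_length:
--         part = parts[index]
--         if part != '.':
--             index += 1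
--             continue
--
--         if index and index == parts_length - 1:
--             parts[index] = ''
--             index += 1
--         else:
--             del parts[index]
--             parts_length -= 1
--             deleted_count += 1
--
--     # Remove double dot parts.
--     to_delete = 0
--
--     for index in reversed(range(parts_length)):
--         part = parts[index]
--         if part == '..':
--             to_delete += 1
--             continue
--
--         if not to_delete:
--             continue
--
--         to_delete -= 1
--         del parts[index]
--         del parts[index]
--         deleted_count += 2
--         parts_length -= 2
--
--
--     while to_delete:
--         to_delete -= 1
--         del parts[0]
--         deleted_count += 1
--         parts_length -= 1
--
--     if deleted_count and (parts_length == 1) and (not parts[0]):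
--         del parts[0]
--         parts_length = 0
--
--     if (parts_length == 0):
--         parts = None
--
--     return parts
-- ===== SOURCE B (Python) =====
-- def normalize_path_parts(parts):
--     """
--     Normalises the given parts.
--
--     Single forward pass building a new stack list (A mutates `parts` in place
--     with repeated `del`/index bookkeeping; B leaves the input list unmodified —
--     the return value is the same).
--     """
--     if parts is None:
--         return None
--
--     last = len(parts) - 1
--     stack = []
--     removed = False
--
--     for index, part in enumerate(parts):
--         if part == '.':
--             if index == last and stack:
--                 stack.append('')
--             else:
--                 removed = True
--         elif part == '..':
--             if stack:
--                 stack.pop()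
--             removed = True
--         else:
--             stack.append(part)
--
--     if removed and stack == ['']:
--         return None
--     if not stack:
--         return None
--     return stack
-- ===== Notes on version B (the rewrite author's own statement) =====
-- stated objective: simpler
-- what changed: A makes three passes over the list with in-place `del`/`set` and index bookkeeping; B is a single forward pass that builds a new stack list (push names, pop on '..'), tracking one 'removed' flag, and never mutates the input.
import Mathlib
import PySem

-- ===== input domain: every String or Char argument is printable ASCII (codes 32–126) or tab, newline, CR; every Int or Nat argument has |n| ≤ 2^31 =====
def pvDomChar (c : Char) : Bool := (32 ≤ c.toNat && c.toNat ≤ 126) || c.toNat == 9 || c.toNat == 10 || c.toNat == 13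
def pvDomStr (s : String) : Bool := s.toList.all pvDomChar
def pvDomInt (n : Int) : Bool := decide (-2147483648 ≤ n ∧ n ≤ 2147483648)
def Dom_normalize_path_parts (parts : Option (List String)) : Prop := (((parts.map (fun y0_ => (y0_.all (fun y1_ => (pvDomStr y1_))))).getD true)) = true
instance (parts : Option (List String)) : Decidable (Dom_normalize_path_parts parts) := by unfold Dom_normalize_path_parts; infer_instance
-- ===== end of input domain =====

-- B replaces A's three passes with in-place `del`/`set` by one forward pass building a
-- new stack list (simpler; A mutates its argument in place, B does not — the equivalence
-- proved here is about the return value only).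

-- ===== PORT A =====
-- Phase 1 of A: the `while index < parts_length` loop removing '.' parts.
-- Invariant of A's code: parts_length = parts.length and index < parts_length at every
-- read, so `parts[index]` is always in range and `getD` is exact.
def pvA_dot (parts : List String) (parts_length index deleted : Nat) :
    List String × Nat × Nat :=
  if h : index < parts_length then
    let part := parts.getD index ""
    if part ≠ "." then
      pvA_dot parts parts_length (index + 1) deleted
    else if index ≠ 0 ∧ index = parts_length - 1 then
      pvA_dot (parts.set index "") parts_length (index + 1) deleted
    else
      pvA_dot (parts.eraseIdx index) (parts_length - 1) index (deleted + 1)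
  else
    (parts, parts_length, deleted)
termination_by parts_length - index
decreasing_by · omega
              · omega
              · omega

-- Phase 2 of A: `for index in reversed(range(parts_length))`; fuel = index + 1.
-- Returns (parts, to_delete, deleted_count, parts_length).
def pvA_ddot (parts : List String) (fuel to_delete deleted parts_length : Nat) :
    List String × Nat × Nat × Nat :=
  match fuel with
  | 0 => (parts, to_delete, deleted, parts_length)
  | i + 1 =>
    let part := parts.getD i ""
    if part = ".." then
      pvA_ddot parts i (to_delete + 1) deleted parts_length
    else if to_delete = 0 then
      pvA_ddot parts i to_delete deleted parts_length
    else
      pvA_ddot ((parts.eraseIdx i).eraseIdx i) i (to_delete - 1) (deleted + 2) (parts_length - 2)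

-- Phase 3 of A: `while to_delete: del parts[0]`.
def pvA_front (parts : List String) (to_delete deleted parts_length : Nat) :
    List String × Nat × Nat :=
  match to_delete with
  | 0 => (parts, deleted, parts_length)
  | t + 1 => pvA_front (parts.eraseIdx 0) t (deleted + 1) (parts_length - 1)

def normalize_path_parts (parts : Option (List String)) : Option (List String) :=
  match parts with
  | none => none
  | some parts0 =>
    let r1 := pvA_dot parts0 parts0.length 0 0
    let r2 := pvA_ddot r1.1 r1.2.1 0 r1.2.2 r1.2.1
    let r3 := pvA_front r2.1 r2.2.1 r2.2.2.1 r2.2.2.2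
    let r4 := if r3.2.1 ≠ 0 ∧ r3.2.2 = 1 ∧ r3.1.getD 0 "" = "" then
        (r3.1.eraseIdx 0, (0 : Nat))
      else (r3.1, r3.2.2)
    if r4.2 = 0 then none else some r4.1

-- ===== PORT B =====
-- B's loop body; the Python list used as a stack (append/pop at the end) is transcribed
-- as a Lean list with its head as the stack top, reversed once at the end.
def pvB_step (last : Int) (st : List String × Bool) (ip : Int × String) :
    List String × Bool :=
  if ip.2 = "." then
    if ip.1 = last ∧ st.1 ≠ [] then ("" :: st.1, st.2) else (st.1, true)
  else if ip.2 = ".." then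
    (st.1.tail, true)
  else
    (ip.2 :: st.1, st.2)

def normalize_path_parts_alt (parts : Option (List String)) : Option (List String) :=
  match parts with
  | none => none
  | some ps =>
    let last : Int := (ps.length : Int) - 1
    let r := (PySem.List.enumerate ps 0).foldl (pvB_step last) ([], false)
    let stack := r.1.reverse
    if r.2 = true ∧ stack = [""] then none
    else if stack = [] then none
    else some stack

-- ===== PRECONDITION & SPEC =====
def Spec_normalize_path_parts (parts : Option (List String)) (out : Option (List String)) : Prop := out = normalize_path_parts_alt parts
instance (parts : Option (List String)) (out : Option (List String)) : Decidable (Spec_normalize_path_parts parts out) := by unfold Spec_normalize_path_parts; infer_instance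

-- ===== CLAIM (what is proved, stated in full; the proofs are below) =====
def Claim_equal_normalize_path_parts : Prop := ∀ (parts : Option (List String)), Dom_normalize_path_parts parts → Spec_normalize_path_parts parts (normalize_path_parts parts)

-- ===== LEMMAS AND PROOFS =====

-- Reference value of A's dot pass on the still-unprocessed suffix, given whether the
-- processed prefix is nonempty: (resulting suffix, number of deleted elements).
def pvDotRest (ne : Bool) : List String → List String × Nat
  | [] => ([], 0)
  | p :: rest =>
    if p = "." then
      if ne = true ∧ rest = [] then ([""], 0)
      else ((pvDotRest ne rest).1, (pvDotRest ne rest).2 + 1)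
    else ((p :: (pvDotRest true rest).1), (pvDotRest true rest).2)

-- Left-to-right '..'-cancellation: stack (head = top) plus count of underflows
-- (i.e. '..' arriving on an empty stack).
def pvFStep (su : List String × Nat) (p : String) : List String × Nat :=
  if p = ".." then (su.1.tail, if su.1 = [] then su.2 + 1 else su.2) else (p :: su.1, su.2)

-- Right-to-left step of A's phase 2: state (to_delete, kept region, deleted count).
def pvRstep (p : String) (tdc : Nat × List String × Nat) : Nat × List String × Nat :=
  if p = ".." then (tdc.1 + 1, tdc.2.1, tdc.2.2)
  else if tdc.1 = 0 then (0, p :: tdc.2.1, tdc.2.2)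
  else (tdc.1 - 1, tdc.2.1, tdc.2.2 + 2)

-- Common abstract value both ports are proved equal to.
def pvAbs (ps : List String) : Option (List String) :=
  let l1 := (pvDotRest false ps).1
  let d1 := (pvDotRest false ps).2
  let res := ((l1.foldl pvFStep ([], 0)).1).reverse
  if (d1 ≠ 0 ∨ ".." ∈ l1) ∧ res = [""] then none
  else if res = [] then none
  else some res

-- simple stack fold without the underflow counter (B's stack)
def pvStk (st : List String) (l : List String) : List String :=
  l.foldl (fun st p => if p = ".." then st.tail else p :: st) st

-- B's step away from the last index.
def pvB_step0 (st : List String × Bool) (p : String) : List String × Bool :=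
  if p = "." then (st.1, true)
  else if p = ".." then (st.1.tail, true)
  else (p :: st.1, st.2)


theorem pv_mid_getD (l r : List String) (p d : String) : (l ++ p :: r).getD l.length d = p := by
  simp [List.getD]

theorem pv_mid_erase (l r : List String) (p : String) : (l ++ p :: r).eraseIdx l.length = l ++ r := by
  rw [List.eraseIdx_append_of_length_le (Nat.le_refl _)]
  simp

theorem pv_mid_set (l r : List String) (p q : String) : (l ++ p :: r).set l.length q = l ++ q :: r := by
  rw [List.set_append]
  simp

-- the deleted-count component of A's phase 2 is additive in its start value
theorem pv_rc_add (l : List String) : ∀ td r c,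
    l.foldr pvRstep (td, r, c)
      = ((l.foldr pvRstep (td, r, 0)).1, (l.foldr pvRstep (td, r, 0)).2.1,
         (l.foldr pvRstep (td, r, 0)).2.2 + c) := by
  induction l with
  | nil => intro td r c; simp
  | cons p l ih =>
    intro td r c
    simp only [List.foldr_cons, ih td r c, pvRstep]
    split_ifs <;> simp <;> omega

theorem pv_dot_go (rest : List String) : ∀ (done : List String) (d : Nat),
    "." ∉ done →
    pvA_dot (done ++ rest) (done.length + rest.length) done.length d
      = (done ++ (pvDotRest (!done.isEmpty) rest).1,
         done.length + (pvDotRest (!done.isEmpty) rest).1.length,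
         d + (pvDotRest (!done.isEmpty) rest).2) := by
  induction rest with
  | nil =>
    intro done d h
    rw [pvA_dot]
    simp [pvDotRest]
  | cons p rest ih =>
    intro done d hdone
    have hlt : done.length < done.length + (p :: rest).length := by
      simp only [List.length_cons]; omega
    rw [pvA_dot]
    rw [dif_pos hlt, pv_mid_getD]
    by_cases hp : p = "."
    · subst hp
      rw [if_neg (by simp)]
      by_cases hc : done ≠ [] ∧ rest = []
      · obtain ⟨hc1, hc2⟩ := hc
        subst hc2
        rw [if_pos ⟨by simpa [List.length_eq_zero_iff] using hc1, by simp⟩]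
        rw [pv_mid_set, pvA_dot]
        rw [dif_neg (by simp only [List.length_cons, List.length_nil]; omega)]
        have hne : (!done.isEmpty) = true := by
          simp [List.isEmpty_iff, hc1]
        simp [pvDotRest, hne]
      · have hcond : ¬ (done.length ≠ 0 ∧ done.length = done.length + ("." :: rest).length - 1) := by
          simp only [List.length_cons]
          rintro ⟨a, b⟩
          exact hc ⟨by simpa [List.length_eq_zero_iff] using a, by
            have : rest.length = 0 := by omega
            simpa [List.length_eq_zero_iff] using this⟩
        rw [if_neg hcond, pv_mid_erase]
        have harg : done.length + ("." :: rest).length - 1 = done.length + rest.length := by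
          simp only [List.length_cons]; omega
        rw [harg, ih done (d + 1) hdone]
        have hcond2 : ¬ ((!done.isEmpty) = true ∧ rest = []) := by
          rintro ⟨a, b⟩
          exact hc ⟨by simpa [List.isEmpty_iff] using a, b⟩
        simp only [pvDotRest]
        rw [if_pos trivial, if_neg hcond2]
        simp only [Prod.mk.injEq]
        exact ⟨by simp, by simp, by omega⟩
    · rw [if_pos hp]
      have hstep : done ++ p :: rest = (done ++ [p]) ++ rest := by simp
      have hlen1 : done.length + (p :: rest).length = (done ++ [p]).length + rest.length := by
        simp only [List.length_append, List.length_cons, List.length_nil]; omega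
      have hlen2 : done.length + 1 = (done ++ [p]).length := by simp
      have hmem : "." ∉ done ++ [p] := by
        intro hm
        rcases List.mem_append.mp hm with h' | h'
        · exact hdone h'
        · exact hp (List.mem_singleton.mp h').symm
      rw [hstep, hlen1, hlen2, ih (done ++ [p]) d hmem]
      have hne2 : (!(done ++ [p]).isEmpty) = true := by simp
      simp only [hne2, pvDotRest, if_neg hp, Prod.mk.injEq]
      refine ⟨by simp, ?_, by simp⟩
      simp only [List.length_append, List.length_cons, List.length_nil]
      omega


theorem pv_ddot_go (pre : List String) : ∀ (td : Nat) (r : List String) (d pl : Nat),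
    pvA_ddot (pre ++ List.replicate td ".." ++ r) pre.length td d pl
      = (List.replicate (pre.foldr pvRstep (td, r, 0)).1 ".." ++ (pre.foldr pvRstep (td, r, 0)).2.1,
         (pre.foldr pvRstep (td, r, 0)).1,
         d + (pre.foldr pvRstep (td, r, 0)).2.2,
         pl - (pre.foldr pvRstep (td, r, 0)).2.2) := by
  induction pre using List.reverseRecOn with
  | nil =>
    intro td r d pl
    simp [pvA_ddot]
  | append_singleton pre p ih =>
    intro td r d pl
    have hsplit : ∀ suf : List String, (pre ++ [p]) ++ suf = pre ++ p :: suf := by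
      intro suf; simp
    have hfuel : (pre ++ [p]).length = pre.length + 1 := by simp
    rw [hfuel]
    simp only [pvA_ddot]
    have hget : ((pre ++ [p]) ++ List.replicate td ".." ++ r).getD pre.length "" = p := by
      rw [List.append_assoc (pre ++ [p]), hsplit]
      exact pv_mid_getD pre _ p ""
    simp only [hget]
    rw [List.foldr_append]
    simp only [List.foldr_cons, List.foldr_nil]
    by_cases hp : p = ".."
    · rw [if_pos hp]
      have hlist : (pre ++ [p]) ++ List.replicate td ".." ++ r
          = pre ++ List.replicate (td + 1) ".." ++ r := by
        subst hp; simp [List.replicate_succ]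
      rw [hlist, ih (td + 1) r d pl]
      simp [pvRstep, hp]
    · rw [if_neg hp]
      by_cases htd : td = 0
      · subst htd
        rw [if_pos rfl]
        have hlist : (pre ++ [p]) ++ List.replicate 0 ".." ++ r
            = pre ++ List.replicate 0 ".." ++ (p :: r) := by simp
        rw [hlist, ih 0 (p :: r) d pl]
        simp [pvRstep, hp]
      · rw [if_neg htd]
        obtain ⟨k, rfl⟩ : ∃ k, td = k + 1 := ⟨td - 1, by omega⟩
        have he1 : (((pre ++ [p]) ++ (List.replicate (k + 1) ".." ++ r)).eraseIdx pre.length)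
            = pre ++ (List.replicate (k + 1) ".." ++ r) := by
          rw [hsplit]
          exact pv_mid_erase pre _ p
        have he2 : ((pre ++ (List.replicate (k + 1) ".." ++ r)).eraseIdx pre.length)
            = pre ++ (List.replicate k ".." ++ r) := by
          rw [List.replicate_succ, List.cons_append]
          exact pv_mid_erase pre _ ".."
        have hstep : pvRstep p (k + 1, r, 0) = (k, r, 2) := by
          simp [pvRstep, hp]
        have hk : k + 1 - 1 = k := rfl
        rw [List.append_assoc (pre ++ [p]), he1, he2, ← List.append_assoc pre, hk,
            ih k r (d + 2) (pl - 2), hstep, pv_rc_add pre k r 2]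
        simp only [Prod.mk.injEq]
        refine ⟨trivial, trivial, by omega, by omega⟩


theorem pv_front_go (t : Nat) : ∀ (r : List String) (d pl : Nat),
    pvA_front (List.replicate t ".." ++ r) t d pl = (r, d + t, pl - t) := by
  induction t with
  | zero => intro r d pl; simp [pvA_front]
  | succ t ih =>
    intro r d pl
    simp only [List.replicate_succ, List.cons_append, pvA_front, List.eraseIdx_cons_zero]
    rw [ih]
    simp only [Prod.mk.injEq, true_and]
    omega


theorem pv_counts (l : List String) : ∀ td r c,
    (l.foldr pvRstep (td, r, c)).1 + (l.foldr pvRstep (td, r, c)).2.1.length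
      + (l.foldr pvRstep (td, r, c)).2.2
      = l.length + td + r.length + c := by
  induction l with
  | nil => intro td r c; simp
  | cons p l ih =>
    intro td r c
    have H := ih td r c
    simp only [List.foldr_cons, pvRstep]
    split_ifs with h1 h2
    · simp only [List.length_cons]; omega
    · simp only [List.length_cons, List.length_cons] at H ⊢; omega
    · simp only [List.length_cons]; omega


theorem pv_bot (l : List String) : ∀ (st : List String) (u : Nat),
    l.foldl pvFStep (st, u)
      = ((l.foldl pvFStep ([], 0)).1 ++ st.drop (l.foldl pvFStep ([], 0)).2,
         u + ((l.foldl pvFStep ([], 0)).2 - st.length)) := by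
  induction l with
  | nil => intro st u; simp
  | cons p l ih =>
    intro st u
    by_cases hp : p = ".."
    · subst hp
      cases st with
      | nil =>
        have s1 : pvFStep (([] : List String), u) ".." = ([], u + 1) := by simp [pvFStep]
        have s2 : pvFStep (([] : List String), 0) ".." = ([], 1) := by simp [pvFStep]
        rw [List.foldl_cons, List.foldl_cons, s1, s2, ih [] (u + 1), ih [] 1]
        simp only [List.drop_nil, List.append_nil, Prod.mk.injEq, List.length_nil]
        exact ⟨trivial, by omega⟩
      | cons x st' =>
        have s1 : pvFStep ((x :: st' : List String), u) ".." = (st', u) := by simp [pvFStep]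
        have s2 : pvFStep (([] : List String), 0) ".." = ([], 1) := by simp [pvFStep]
        rw [List.foldl_cons, List.foldl_cons, s1, s2, ih st' u, ih [] 1]
        simp only [List.drop_nil, List.append_nil, Prod.mk.injEq, List.length_nil, List.length_cons]
        obtain ⟨E1, E2⟩ := List.foldl pvFStep ([], 0) l
        simp only []
        constructor
        · simp only [Nat.sub_zero]
          rw [Nat.add_comm 1 E2, List.drop_succ_cons]
        · omega
    · have s1 : pvFStep ((st : List String), u) p = (p :: st, u) := by simp [pvFStep, hp]
      have s2 : pvFStep (([] : List String), 0) p = ([p], 0) := by simp [pvFStep, hp]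
      rw [List.foldl_cons, List.foldl_cons, s1, s2, ih (p :: st) u, ih [p] 0]
      obtain ⟨E1, E2⟩ := List.foldl pvFStep ([], 0) l
      simp only [List.length_cons, List.length_singleton, Prod.mk.injEq]
      cases E2 with
      | zero =>
        constructor
        · simp [List.append_assoc]
        · simp only [List.length_nil]; omega
      | succ k =>
        constructor
        · simp only [List.drop_succ_cons, Nat.zero_add, Nat.succ_sub_one, List.drop]
          cases k with
          | zero => simp
          | succ k' => simp [List.append_assoc]
        · simp only [List.length_nil]; omega


theorem pv_rr_eq_f (l : List String) :
    (l.foldr pvRstep (0, [], 0)).1 = (l.foldl pvFStep ([], 0)).2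
      ∧ (l.foldr pvRstep (0, [], 0)).2.1 = ((l.foldl pvFStep ([], 0)).1).reverse := by
  induction l with
  | nil => simp
  | cons p l ih =>
    obtain ⟨ih1, ih2⟩ := ih
    by_cases hp : p = ".."
    · subst hp
      have s2 : pvFStep (([] : List String), 0) ".." = ([], 1) := by simp [pvFStep]
      rw [List.foldr_cons, List.foldl_cons, s2, pv_bot l [] 1]
      simp only [List.drop_nil, List.append_nil, List.length_nil, Nat.sub_zero]
      constructor
      · simp [pvRstep, ih1, Nat.add_comm]
      · simp [pvRstep, ih2]
    · have s2 : pvFStep (([] : List String), 0) p = ([p], 0) := by simp [pvFStep, hp]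
      rw [List.foldr_cons, List.foldl_cons, s2, pv_bot l [p] 0]
      simp only [pvRstep, if_neg hp]
      rcases hE : List.foldl pvFStep ([], 0) l with ⟨E1, E2⟩
      rw [hE] at ih1 ih2
      cases E2 with
      | zero =>
        rw [ih1]
        simp [ih2]
      | succ k =>
        rw [ih1]
        simp only [Nat.succ_ne_zero, if_neg (Nat.succ_ne_zero k)]
        constructor
        · simp
        · simp [ih2, List.drop_succ_cons]


theorem pv_noddot (l : List String) (h : ".." ∉ l) :
    (l.foldr pvRstep (0, [], 0)).1 = 0 ∧ (l.foldr pvRstep (0, [], 0)).2.2 = 0 := by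
  induction l with
  | nil => simp
  | cons p l ih =>
    have hp : p ≠ ".." := fun hc => h (hc ▸ List.mem_cons_self ..)
    have hl : ".." ∉ l := fun hc => h (List.mem_cons_of_mem _ hc)
    obtain ⟨h1, h2⟩ := ih hl
    simp only [List.foldr_cons, pvRstep, if_neg hp, h1, if_pos rfl]
    exact ⟨rfl, h2⟩


theorem pv_hasddot (l : List String) (h : ".." ∈ l) :
    ¬ ((l.foldr pvRstep (0, [], 0)).1 = 0 ∧ (l.foldr pvRstep (0, [], 0)).2.2 = 0) := by
  induction l with
  | nil => simp at h
  | cons p l ih =>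
    rintro ⟨h1, h2⟩
    by_cases hp : p = ".."
    · simp only [List.foldr_cons, pvRstep, if_pos hp] at h1
      omega
    · have hl : ".." ∈ l := by
        rcases List.mem_cons.mp h with h' | h'
        · exact absurd h'.symm hp
        · exact h'
      by_cases htd : (l.foldr pvRstep (0, [], 0)).1 = 0
      · simp only [List.foldr_cons, pvRstep, if_neg hp, htd, if_pos rfl] at h1 h2
        exact ih hl ⟨htd, h2⟩
      · simp only [List.foldr_cons, pvRstep, if_neg hp, if_neg htd] at h2
        omega


theorem pv_A_char (ps : List String) : normalize_path_parts (some ps) = pvAbs ps := by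
  have h1 := pv_dot_go ps [] 0 (by simp)
  simp only [List.nil_append, List.length_nil, Nat.zero_add, List.isEmpty_nil,
    Bool.not_true] at h1
  have hcounts := pv_counts ((pvDotRest false ps).1) 0 [] 0
  have hdd : ((((pvDotRest false ps).1).foldr pvRstep (0, [], 0)).1 = 0
      ∧ (((pvDotRest false ps).1).foldr pvRstep (0, [], 0)).2.2 = 0) ↔ ".." ∉ (pvDotRest false ps).1 := by
    constructor
    · intro h hm; exact pv_hasddot _ hm h
    · exact pv_noddot _
  obtain ⟨hrr1, hrr2⟩ := pv_rr_eq_f ((pvDotRest false ps).1)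
  have h2 := pv_ddot_go ((pvDotRest false ps).1) 0 [] ((pvDotRest false ps).2)
    ((pvDotRest false ps).1).length
  simp only [List.replicate_zero, List.append_nil, List.nil_append] at h2
  have h3 := pv_front_go ((((pvDotRest false ps).1).foldr pvRstep (0, [], 0)).1)
    ((((pvDotRest false ps).1).foldr pvRstep (0, [], 0)).2.1)
    ((pvDotRest false ps).2 + (((pvDotRest false ps).1).foldr pvRstep (0, [], 0)).2.2)
    (((pvDotRest false ps).1).length - (((pvDotRest false ps).1).foldr pvRstep (0, [], 0)).2.2)
  simp only [normalize_path_parts, pvAbs, h1, h2, h3]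
  rw [hrr1] at hdd
  rw [hrr1, hrr2] at hcounts h3 ⊢
  simp only [List.length_nil, Nat.add_zero, Nat.zero_add] at hcounts
  generalize hC : (((pvDotRest false ps).1).foldr pvRstep (0, [], 0)).2.2 = c at *
  generalize hD : (pvDotRest false ps).2 = d1 at *
  generalize hl1 : (pvDotRest false ps).1 = l1 at *
  generalize hF : l1.foldl pvFStep ([], 0) = F at *
  obtain ⟨st, u⟩ := F
  simp only at hcounts hdd h3 ⊢
  generalize hres : st.reverse = res at *
  have hsing : (res.length = 1 ∧ res.getD 0 "" = "") ↔ res = [""] := by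
    cases res with
    | nil => simp
    | cons x t =>
      cases t with
      | nil => simp [List.getD]
      | cons y t' => simp
  have hcond : ((d1 + c + u ≠ 0) ∧ l1.length - c - u = 1 ∧ res.getD 0 "" = "")
      ↔ ((d1 ≠ 0 ∨ ".." ∈ l1) ∧ res = [""]) := by
    have hlen : l1.length - c - u = res.length := by omega
    rw [hlen]
    constructor
    · rintro ⟨a, b, c'⟩
      refine ⟨?_, hsing.mp ⟨b, c'⟩⟩
      by_cases hm : ".." ∈ l1
      · exact Or.inr hm
      · obtain ⟨hu, hc⟩ := hdd.mpr hm
        exact Or.inl (by omega)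
    · rintro ⟨a, b⟩
      obtain ⟨b1, b2⟩ := hsing.mpr b
      refine ⟨?_, b1, b2⟩
      rcases a with a | a
      · omega
      · have : ¬ (u = 0 ∧ c = 0) := fun hx => (hdd.mp hx) a
        omega
  by_cases hc1 : (d1 ≠ 0 ∨ ".." ∈ l1) ∧ res = [""]
  · rw [if_pos (hcond.mpr hc1), if_pos hc1]
    simp
  · rw [if_neg (fun h => hc1 (hcond.mp h)), if_neg hc1]
    have hlen : l1.length - c - u = res.length := by omega
    rw [hlen]
    simp [List.length_eq_zero_iff]


theorem pv_enum_fold (l : List String) : ∀ (s last : Int) (acc : List String × Bool),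
    s + l.length ≤ last →
    (PySem.List.enumerate l s).foldl (pvB_step last) acc = l.foldl pvB_step0 acc := by
  induction l with
  | nil => intro s last acc h; simp [PySem.List.enumerate_nil]
  | cons p l ih =>
    intro s last acc h
    have hlen : ((p :: l).length : Int) = (l.length : Int) + 1 := by push_cast [List.length_cons]; ring
    have hs : s ≠ last := by rw [hlen] at h; have : (0:Int) ≤ (l.length : Int) := Int.natCast_nonneg _; omega
    rw [PySem.List.enumerate_cons, List.foldl_cons]
    have hstep : pvB_step last acc (s, p) = pvB_step0 acc p := by
      simp only [pvB_step, pvB_step0]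
      split_ifs with c1 c2 <;> simp_all
    rw [hstep]
    exact ih (s + 1) last _ (by rw [hlen] at h; omega)


theorem pv_step0_fold (l : List String) : ∀ (st : List String) (fl : Bool),
    l.foldl pvB_step0 (st, fl)
      = (pvStk st (l.filter (fun p => !(p == "."))),
         fl || l.any (fun p => p == "." || p == "..")) := by
  induction l with
  | nil => intro st fl; simp [pvStk]
  | cons p l ih =>
    intro st fl
    by_cases h1 : p = "."
    · simp only [List.foldl_cons, pvB_step0, if_pos h1, ih, List.filter_cons, h1]
      simp
    · by_cases h2 : p = ".."
      · simp only [List.foldl_cons, pvB_step0, if_neg h1, if_pos h2, ih, List.filter_cons, h1, h2]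
        simp [pvStk, h2]
      · have b1 : (p == ".") = false := by simp [h1]
        have b2 : (p == "..") = false := by simp [h2]
        simp only [List.foldl_cons, pvB_step0, if_neg h1, if_neg h2, ih, List.filter_cons, b1, b2]
        simp [pvStk, b1, b2, h2]


theorem pv_f_fst (l : List String) : ∀ (st : List String) (u : Nat),
    (l.foldl pvFStep (st, u)).1 = pvStk st l := by
  induction l with
  | nil => intro st u; rfl
  | cons p l ih =>
    intro st u
    by_cases hp : p = ".."
    · simp only [pvStk, List.foldl_cons, pvFStep, if_pos hp]
      exact ih _ _
    · simp only [pvStk, List.foldl_cons, pvFStep, if_neg hp]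
      exact ih _ _


theorem pv_stk_no_ddot (l : List String) (h : ".." ∉ l) : ∀ st, pvStk st l = l.reverse ++ st := by
  induction l with
  | nil => intro st; simp [pvStk]
  | cons p l ih =>
    intro st
    have hp : p ≠ ".." := fun hc => h (hc ▸ List.mem_cons_self ..)
    have hl : ".." ∉ l := fun hc => h (List.mem_cons_of_mem _ hc)
    simp only [pvStk, List.foldl_cons, if_neg hp]
    rw [show List.foldl _ (p :: st) l = pvStk (p :: st) l from rfl, ih hl (p :: st)]
    simp


theorem pv_dotrest_append (l : List String) : ∀ (ne : Bool) (x : String),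
    pvDotRest ne (l ++ [x])
      = (if x = "." then
           (if (ne || l.any (fun p => !(p == "."))) = true then
              (l.filter (fun p => !(p == ".")) ++ [""], l.count ".")
            else (l.filter (fun p => !(p == ".")), l.count "." + 1))
         else (l.filter (fun p => !(p == ".")) ++ [x], l.count ".")) := by
  induction l with
  | nil =>
    intro ne x
    by_cases hx : x = "."
    · by_cases hne : ne = true
      · simp [pvDotRest, hx, hne]
      · simp [pvDotRest, hx, hne, Bool.eq_false_iff.mpr hne]
    · simp [pvDotRest, hx]
  | cons p l ih =>
    intro ne x
    by_cases hp : p = "."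
    · have hcons : pvDotRest ne ((p :: l) ++ [x])
          = ((pvDotRest ne (l ++ [x])).1, (pvDotRest ne (l ++ [x])).2 + 1) := by
        rw [List.cons_append]
        simp only [pvDotRest]
        rw [if_pos hp, if_neg (by simp)]
      rw [hcons, ih ne x]
      have hb : (p == ".") = true := by simp [hp]
      by_cases hx : x = "."
      · by_cases hflag : (ne || l.any fun p => !(p == ".")) = true
        · simp [hx, hflag, hb, List.count_cons, hp]
        · simp [hx, hflag, hb, Bool.eq_false_iff.mpr hflag, List.count_cons, hp]
      · simp [hx, hb, List.count_cons, hp]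
    · have hcons : pvDotRest ne ((p :: l) ++ [x])
          = (p :: (pvDotRest true (l ++ [x])).1, (pvDotRest true (l ++ [x])).2) := by
        rw [List.cons_append]
        simp only [pvDotRest]
        rw [if_neg hp]
      rw [hcons, ih true x]
      have hb : (p == ".") = false := by simp [hp]
      by_cases hx : x = "."
      · simp [hx, hb, List.count_cons, hp]
      · simp [hx, hb, List.count_cons, hp]


theorem pv_B_char (ps : List String) : normalize_path_parts_alt (some ps) = pvAbs ps := by
  rcases List.eq_nil_or_concat ps with rfl | ⟨init, x, hps⟩
  · rfl
  · rw [List.concat_eq_append] at hps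
    subst hps
    have hlast : ((init ++ [x]).length : Int) - 1 = (init.length : Int) := by
      simp
    simp only [normalize_path_parts_alt, hlast]
    rw [PySem.List.enumerate_append, List.foldl_append,
      pv_enum_fold init 0 (init.length : Int) ([], false) (by simp),
      pv_step0_fold init [] false,
      PySem.List.enumerate_cons, PySem.List.enumerate_nil]
    simp only [List.foldl_cons, List.foldl_nil, Bool.false_or]
    have hzero : (0 : Int) + (init.length : Int) = (init.length : Int) := by ring
    rw [hzero]
    simp only [pvAbs]
    rw [pv_dotrest_append init false x]
    simp only [Bool.false_or]
    set f := init.filter (fun p => !(p == ".")) with hf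
    set S := pvStk ([] : List String) f with hS
    set A := init.any (fun p => p == "." || p == "..") with hA
    have hmemf : ".." ∈ f ↔ ".." ∈ init := by
      rw [hf, List.mem_filter]
      simp
    have hcnt : ¬ init.count "." = 0 ↔ "." ∈ init := by
      rw [← List.count_pos_iff]
      omega
    have hAiff : A = true ↔ ("." ∈ init ∨ ".." ∈ init) := by
      rw [hA, List.any_eq_true]
      constructor
      · rintro ⟨p, hp, hor⟩
        rcases Bool.or_eq_true_iff.mp hor with h' | h'
        · exact Or.inl ((beq_iff_eq.mp h') ▸ hp)
        · exact Or.inr ((beq_iff_eq.mp h') ▸ hp)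
      · rintro (h' | h')
        · exact ⟨".", h', by simp⟩
        · exact ⟨"..", h', by simp⟩
    have hfold : (f.foldl pvFStep ([], 0)).1 = S := pv_f_fst f [] 0
    by_cases hx1 : x = "."
    · subst hx1
      rw [if_pos rfl]
      by_cases hSnil : S = []
      · -- B's stack is empty at the final '.', so B drops it; both sides return none
        have hB : pvB_step (init.length : Int) ([], A) ((init.length : Int), ".") = ([], true) := by
          simp [pvB_step]
        by_cases hany : (init.any fun p => !(p == ".")) = true
        · -- some non-dot part exists but the stack is empty: a '..' consumed it
          have hfne : f ≠ [] := by
            rcases List.any_eq_true.mp hany with ⟨p, hp, hnp⟩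
            intro hfnil
            have : p ∈ f := by
              rw [hf, List.mem_filter]
              exact ⟨hp, hnp⟩
            simp [hfnil] at this
          have hddot : ".." ∈ f := by
            by_contra hnd
            apply hfne
            have h' := pv_stk_no_ddot f hnd []
            rw [hS, h'] at hSnil
            simpa using List.reverse_eq_nil_iff.mp (by simpa using hSnil)
          rw [if_pos hany, List.foldl_append]
          have hstep : pvFStep (f.foldl pvFStep ([], 0)) ""
              = ("" :: (f.foldl pvFStep ([], 0)).1, (f.foldl pvFStep ([], 0)).2) := by
            simp [pvFStep]
          simp [hB, hstep, hfold, hSnil, hddot]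
        · rw [if_neg hany]
          have hfnil : f = [] := by
            rw [hf, List.filter_eq_nil_iff]
            intro a ha
            have := List.any_eq_false.mp (Bool.eq_false_iff.mpr hany) a ha
            simpa using this
          have hSnil' : S = [] := by rw [hS, hfnil]; rfl
          simp [hB, hfnil, hSnil']
      · -- stack nonempty: the final '.' becomes '' on both sides
        have hB : pvB_step (init.length : Int) (S, A) ((init.length : Int), ".") = ("" :: S, A) := by
          simp [pvB_step, hSnil]
        have hany : (init.any fun p => !(p == ".")) = true := by
          by_contra hany
          apply hSnil
          have hfnil : f = [] := by
            rw [hf, List.filter_eq_nil_iff]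
            intro a ha
            have := List.any_eq_false.mp (Bool.eq_false_iff.mpr hany) a ha
            simpa using this
          rw [hS, hfnil]
          rfl
        rw [if_pos hany, List.foldl_append]
        have hstep : pvFStep (f.foldl pvFStep ([], 0)) ""
            = ("" :: (f.foldl pvFStep ([], 0)).1, (f.foldl pvFStep ([], 0)).2) := by
          simp [pvFStep]
        have hne1 : ("" :: S).reverse ≠ [""] := by
          intro h
          have := congrArg List.length h
          simp at this
          exact hSnil this
        have hne2 : ("" :: S).reverse ≠ [] := by simp
        simp [hB, hstep, hfold, hSnil]
    · -- last element is not '.'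
      rw [if_neg hx1, List.foldl_append]
      by_cases hx2 : x = ".."
      · subst hx2
        have hB : pvB_step (init.length : Int) (S, A) ((init.length : Int), "..") = (S.tail, true) := by
          simp [pvB_step]
        have hstep : pvFStep (f.foldl pvFStep ([], 0)) ".."
            = ((f.foldl pvFStep ([], 0)).1.tail,
               if (f.foldl pvFStep ([], 0)).1 = [] then (f.foldl pvFStep ([], 0)).2 + 1
               else (f.foldl pvFStep ([], 0)).2) := by
          simp [pvFStep]
        rw [hB]
        simp only [List.foldl_cons, List.foldl_nil, hstep, hfold]
        by_cases hst : S.tail.reverse = [""]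
        · simp [hst]
        · simp [hst]
      · have hB : pvB_step (init.length : Int) (S, A) ((init.length : Int), x) = (x :: S, A) := by
          simp [pvB_step, hx1, hx2]
        have hstep : pvFStep (f.foldl pvFStep ([], 0)) x
            = (x :: (f.foldl pvFStep ([], 0)).1, (f.foldl pvFStep ([], 0)).2) := by
          simp [pvFStep, hx2]
        have hflags : A = true ↔ (¬ init.count "." = 0 ∨ ".." ∈ f ∨ (".." : String) = x) := by
          rw [hAiff, hcnt]
          constructor
          · rintro (h' | h')
            · exact Or.inl h'
            · exact Or.inr (Or.inl (hmemf.mpr h'))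
          · rintro (h' | h' | h')
            · exact Or.inl h'
            · exact Or.inr (hmemf.mp h')
            · exact absurd h'.symm hx2
        rw [hB]
        simp only [List.foldl_cons, List.foldl_nil, hstep, hfold, List.reverse_cons]
        by_cases hst : S.reverse ++ [x] = [""]
        · by_cases hAt : A = true
          · simp [hst, hAt, hflags.mp hAt]
          · have hAf : A = false := Bool.eq_false_iff.mpr hAt
            have hcondf : ¬ (¬ init.count "." = 0 ∨ ".." ∈ f ∨ (".." : String) = x) :=
              fun h => hAt (hflags.mpr h)
            simp [hst, hAf, hcondf]
        · simp [hst]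
-- ===== VERDICT (by name: the statement is the Claim_ definition above) =====
theorem normalize_path_parts_spec : Claim_equal_normalize_path_parts := by
  intro parts _
  unfold Spec_normalize_path_parts
  cases parts with
  | none => rfl
  | some ps => rw [pv_A_char, pv_B_char]
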